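-- pv_equiv track=rewrite | github.com/violetcodes/doc-parsing-poc | code/extract_and_normalize.py | get_num_from_side
-- ===== SOURCE A (Python) =====
-- import re, string
--
-- string_to_numeric_map = {'one': 1, 'two': 2, 'three': 3,
--                         'four': 4, 'five': 5, 'six': 6,
--                         'seven': 7, 'eight': 8, 'nine': 9,
--                         'eleven': 11, 'twelve': 12, 'thirteen': 13,
--                         'fourteen': 14, 'fifteen': 15, 'sixteen': 16,
--                         'seventeen': 17, 'eighteen': 18, 'ninteen': 19,
--                         'twenty': 20, 'thirty': 30, 'fourty': 40,
--                         'fifty': 50, 'sixty': 60, 'seventy': 70,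
--                         'eighty': 80, 'ninety': 90}
--
-- hundred_and_thousand = 'hundred thousand'.split()
--
-- def get_num_from_side(split_text, which_side='left'):
--     '''let's say you have 'for 30 days he gains 89 pounds', which is a left split of a string
--     and you wand to extract rightest num'''
--     words_ = reverse_left_words = split_text.split()
--
--     if which_side == 'left':
--         words_ = words_[::-1]
--
--     numbers_as_text = list(string_to_numeric_map.keys()) + hundred_and_thousand
--
--     free_punct = lambda word: ''.join([i for i in word if i not in string.punctuation])
--     result = 'NA'
--     for i, word in enumerate(words_):
--         if free_punct(word) in numbers_as_text:
--             j = i + 1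
--             while j<len(words_) and free_punct(words_[j]) in numbers_as_text:
--                 j+=1
--             result = words_[i:j]
--             break
--         elif free_punct(word).isdecimal():
--             j = i + 1
--             while j<len(words_) and free_punct(words_[j]).isdecimal():
--                 j+=1
--             result = words_[i:j]
--             break
--
--     if isinstance(result, str):
--         return result
--
--     if which_side == 'left':
--         return ' '.join([free_punct(i) for i in result[::-1]])
--     return ' '.join([free_punct(i) for i in result])
-- ===== SOURCE B (Python) =====
-- import string
--
-- string_to_numeric_map = {'one': 1, 'two': 2, 'three': 3,
--                         'four': 4, 'five': 5, 'six': 6,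
--                         'seven': 7, 'eight': 8, 'nine': 9,
--                         'eleven': 11, 'twelve': 12, 'thirteen': 13,
--                         'fourteen': 14, 'fifteen': 15, 'sixteen': 16,
--                         'seventeen': 17, 'eighteen': 18, 'ninteen': 19,
--                         'twenty': 20, 'thirty': 30, 'fourty': 40,
--                         'fifty': 50, 'sixty': 60, 'seventy': 70,
--                         'eighty': 80, 'ninety': 90}
--
-- _NUMBER_WORDS = set(string_to_numeric_map) | {'hundred', 'thousand'}
-- _PUNCT = set(string.punctuation)
--
--
-- def _strip(word):
--     return ''.join(c for c in word if c not in _PUNCT)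
--
--
-- def _cat(s):
--     """0 = not a number token, 1 = number word, 2 = decimal digits."""
--     if s in _NUMBER_WORDS:
--         return 1
--     if s.isdecimal():
--         return 2
--     return 0
--
--
-- def get_num_from_side(split_text, which_side='left'):
--     tokens = split_text.split()
--     if which_side == 'left':
--         tokens.reverse()
--     stripped = [_strip(t) for t in tokens]
--     # Build maximal runs of equal category back-to-front by prepending,
--     # then take the first run whose category is numeric.
--     runs = []
--     for s in reversed(stripped):
--         c = _cat(s)
--         if runs and runs[0][0] == c:
--             runs[0] = (c, [s] + runs[0][1])
--         else:
--             runs.insert(0, (c, [s]))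
--     for c, run in runs:
--         if c:
--             return ' '.join(reversed(run) if which_side == 'left' else run)
--     return 'NA'
-- ===== Notes on version B (the rewrite author's own statement) =====
-- stated objective: alternative
-- what changed: B strips punctuation from every token once, classifies each stripped token into a category (number word / decimal / other), builds all maximal equal-category runs in one back-to-front grouping pass, and returns the first numeric run, instead of A's indexed scan that finds a first match and then rescans forward with a while loop, re-stripping tokens repeatedly.
import Mathlib
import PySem

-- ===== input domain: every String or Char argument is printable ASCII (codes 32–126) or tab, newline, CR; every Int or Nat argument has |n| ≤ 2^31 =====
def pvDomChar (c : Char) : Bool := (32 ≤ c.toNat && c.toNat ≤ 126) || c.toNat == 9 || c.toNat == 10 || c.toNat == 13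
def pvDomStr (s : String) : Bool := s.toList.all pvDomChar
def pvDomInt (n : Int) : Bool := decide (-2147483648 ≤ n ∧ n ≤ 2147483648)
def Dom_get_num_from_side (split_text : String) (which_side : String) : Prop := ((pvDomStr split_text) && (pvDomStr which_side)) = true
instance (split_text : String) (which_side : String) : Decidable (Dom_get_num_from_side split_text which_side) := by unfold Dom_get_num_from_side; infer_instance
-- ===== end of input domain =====

-- B builds maximal category-runs of the once-stripped tokens and picks the first
-- numeric run, instead of A's indexed find-then-rescan with repeated punctuation
-- stripping (objective: alternative decomposition).


-- ===== PORT A =====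

-- string.punctuation
def pvPunct : List Char := "!\"#$%&'()*+,-./:;<=>?@[\\]^_`{|}~".toList

-- numbers_as_text = list(string_to_numeric_map.keys()) + hundred_and_thousand
def pvNumbersAsText : List String :=
  ["one", "two", "three", "four", "five", "six", "seven", "eight", "nine",
   "eleven", "twelve", "thirteen", "fourteen", "fifteen", "sixteen",
   "seventeen", "eighteen", "ninteen", "twenty", "thirty", "fourty",
   "fifty", "sixty", "seventy", "eighty", "ninety", "hundred", "thousand"]

-- free_punct = lambda word: ''.join([i for i in word if i not in string.punctuation])
def pvFreePunct (w : String) : String :=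
  String.ofList (w.toList.filter (fun c => !(pvPunct.contains c)))

-- the for/enumerate loop with the two while-rescans and the break; 'none' = result stayed 'NA'
def pvFindRunA : List String → Option (List String)
  | [] => none
  | w :: ws =>
    if pvNumbersAsText.contains (pvFreePunct w) then
      some (w :: ws.takeWhile (fun u => pvNumbersAsText.contains (pvFreePunct u)))
    else if PySem.Str.strIsdigit (pvFreePunct w) then
      some (w :: ws.takeWhile (fun u => PySem.Str.strIsdigit (pvFreePunct u)))
    else pvFindRunA ws

def get_num_from_side (split_text : String) (which_side : String) : String :=
  let words0 := PySem.Str.split₀ split_text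
  let words_ := if which_side == "left" then words0.reverse else words0
  match pvFindRunA words_ with
  | none => "NA"
  | some result =>
    if which_side == "left" then PySem.Str.join " " (result.reverse.map pvFreePunct)
    else PySem.Str.join " " (result.map pvFreePunct)

-- ===== PORT B =====

-- _cat: 0 = not a number token, 1 = number word, 2 = decimal digits
def pvCat (s : String) : Nat :=
  if pvNumbersAsText.contains s then 1
  else if PySem.Str.strIsdigit s then 2
  else 0

-- one step of Source B's run-building loop (iterating reversed(stripped), prepending)
def pvAddTok (s : String) (runs : List (Nat × List String)) : List (Nat × List String) :=
  let c := pvCat s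
  match runs with
  | (c', run) :: rs => if c' = c then (c, s :: run) :: rs else (c, [s]) :: (c', run) :: rs
  | [] => [(c, [s])]

-- the second loop: first run with a numeric (nonzero) category
def pvPick : List (Nat × List String) → Option (List String)
  | [] => none
  | (c, run) :: rs => if c ≠ 0 then some run else pvPick rs

def get_num_from_side_alt (split_text : String) (which_side : String) : String :=
  let tokens0 := PySem.Str.split₀ split_text
  let tokens := if which_side == "left" then tokens0.reverse else tokens0
  let stripped := tokens.map pvFreePunct
  let runs := stripped.foldr pvAddTok []
  match pvPick runs with
  | none => "NA"
  | some run =>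
    if which_side == "left" then PySem.Str.join " " run.reverse
    else PySem.Str.join " " run

-- ===== PRECONDITION & SPEC =====
def Spec_get_num_from_side (split_text : String) (which_side : String) (out : String) : Prop := out = get_num_from_side_alt split_text which_side
instance (split_text : String) (which_side : String) (out : String) : Decidable (Spec_get_num_from_side split_text which_side out) := by unfold Spec_get_num_from_side; infer_instance

-- ===== CLAIM (what is proved, stated in full; the proofs are below) =====
def Claim_equal_get_num_from_side : Prop := ∀ (split_text : String) (which_side : String), Dom_get_num_from_side split_text which_side → Spec_get_num_from_side split_text which_side (get_num_from_side split_text which_side)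

-- ===== LEMMAS AND PROOFS =====

-- no number word consists of digits
lemma pvNumbers_not_digit : ∀ s ∈ pvNumbersAsText, PySem.Str.strIsdigit s = false := by
  decide

lemma pvCat_eq_one_iff (s : String) : (pvCat s == 1) = pvNumbersAsText.contains s := by
  unfold pvCat
  split_ifs with h1 h2
  · rw [h1]; decide
  · have hf : pvNumbersAsText.contains s = false := by simpa using h1
    rw [hf]; decide
  · have hf : pvNumbersAsText.contains s = false := by simpa using h1
    rw [hf]; decide

lemma pvCat_eq_two_iff (s : String) : (pvCat s == 2) = PySem.Str.strIsdigit s := by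
  unfold pvCat
  split_ifs with h1 h2
  · rw [pvNumbers_not_digit s (by simpa using h1)]; decide
  · rw [h2]; decide
  · have hf : PySem.Str.strIsdigit s = false := by simpa using h2
    rw [hf]; decide

-- canonical maximal runs, built top-down
def pvSpanRuns : List String → List (Nat × List String)
  | [] => []
  | s :: rest =>
    (pvCat s, s :: rest.takeWhile (fun u => pvCat u == pvCat s)) ::
      pvSpanRuns (rest.dropWhile (fun u => pvCat u == pvCat s))
  termination_by l => l.length
  decreasing_by
    simp only [List.length_cons]
    exact Nat.lt_succ_of_le (List.length_dropWhile_le _ _)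

-- the foldr of Source B's loop body builds exactly the canonical runs
lemma pvFoldr_eq_spanRuns (ss : List String) : ss.foldr pvAddTok [] = pvSpanRuns ss := by
  induction ss with
  | nil => simp [pvSpanRuns]
  | cons s rest ih =>
    rw [List.foldr_cons, ih]
    cases rest with
    | nil => simp [pvSpanRuns, pvAddTok]
    | cons t rest2 =>
      conv_rhs => rw [pvSpanRuns]
      rw [pvSpanRuns]
      by_cases hc : pvCat t = pvCat s
      · rw [pvAddTok]
        simp only [hc]
        rw [List.takeWhile_cons, List.dropWhile_cons]
        simp [hc]
      · have hbeq : (pvCat t == pvCat s) = false := by simpa using hc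
        rw [List.takeWhile_cons, List.dropWhile_cons, hbeq]
        rw [pvAddTok]
        simp [pvSpanRuns, hc]

-- A's find-first (on stripped tokens) as a reference scan
def pvSFind : List String → Option (List String)
  | [] => none
  | s :: rest =>
    if pvCat s ≠ 0 then some (s :: rest.takeWhile (fun u => pvCat u == pvCat s))
    else pvSFind rest

lemma pvSFind_dropWhile_zero (ss : List String) :
    pvSFind (ss.dropWhile (fun u => pvCat u == 0)) = pvSFind ss := by
  induction ss with
  | nil => rfl
  | cons s rest ih =>
    by_cases h : pvCat s = 0
    · have hb : (pvCat s == 0) = true := by simp [h]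
      rw [List.dropWhile_cons, if_pos hb, ih]
      conv_rhs => rw [pvSFind]
      rw [if_neg (by simp [h])]
    · have hb : (pvCat s == 0) = true → False := by simp [h]
      rw [List.dropWhile_cons, if_neg hb]

lemma pvPick_spanRuns (ss : List String) : pvPick (pvSpanRuns ss) = pvSFind ss := by
  induction hl : ss.length using Nat.strong_induction_on generalizing ss with
  | _ n ih =>
    cases ss with
    | nil => simp [pvSpanRuns, pvPick, pvSFind]
    | cons s rest =>
      rw [pvSpanRuns, pvPick, pvSFind]
      by_cases h : pvCat s = 0
      · rw [if_neg (by simp [h]), if_neg (by simp [h])]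
        rw [ih ((rest.dropWhile (fun u => pvCat u == pvCat s)).length)
              (by rw [← hl, List.length_cons]; exact Nat.lt_succ_of_le (List.length_dropWhile_le _ _)) _ rfl]
        rw [h]
        exact pvSFind_dropWhile_zero rest
      · rw [if_pos h, if_pos h]

-- A's raw-token scan, stripped afterwards, equals the reference scan on the stripped tokens
lemma pvFindRunA_map (ws : List String) :
    (pvFindRunA ws).map (List.map pvFreePunct) = pvSFind (ws.map pvFreePunct) := by
  induction ws with
  | nil => rfl
  | cons w rest ih =>
    rw [pvFindRunA, List.map_cons, pvSFind]
    by_cases h1 : pvNumbersAsText.contains (pvFreePunct w) = true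
    · have hc : pvCat (pvFreePunct w) = 1 := by unfold pvCat; rw [if_pos h1]
      rw [if_pos h1, if_pos (by rw [hc]; exact one_ne_zero)]
      simp only [Option.map_some, List.map_cons, List.takeWhile_map]
      simp only [hc, Function.comp_def, pvCat_eq_one_iff]
    · by_cases h2 : PySem.Str.strIsdigit (pvFreePunct w) = true
      · have hc : pvCat (pvFreePunct w) = 2 := by
          unfold pvCat
          rw [if_neg h1, if_pos h2]
        rw [if_neg h1, if_pos h2, if_pos (by rw [hc]; exact two_ne_zero)]
        simp only [Option.map_some, List.map_cons, List.takeWhile_map]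
        simp only [hc, Function.comp_def, pvCat_eq_two_iff]
      · have hc : pvCat (pvFreePunct w) = 0 := by
          unfold pvCat
          rw [if_neg h1, if_neg h2]
        rw [if_neg h1, if_neg h2, if_neg (by simp [hc]), ih]

-- ===== VERDICT (by name: the statement is the Claim_ definition above) =====
theorem get_num_from_side_spec : Claim_equal_get_num_from_side := by
  intro split_text which_side _
  simp only [Spec_get_num_from_side, get_num_from_side, get_num_from_side_alt]
  rw [pvFoldr_eq_spanRuns, pvPick_spanRuns, ← pvFindRunA_map]
  cases hfr : pvFindRunA (if (which_side == "left") = true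
      then (PySem.Str.split₀ split_text).reverse else PySem.Str.split₀ split_text) with
  | none => rfl
  | some r =>
    simp only [Option.map_some]
    by_cases hs : (which_side == "left") = true
    · simp [hs, List.map_reverse]
    · simp [hs]
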